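-- pv_equiv track=rewrite | github.com/boogieLing/Tsugie | 数据端/scripts/export_ios_seed.py | count_by_category
-- ===== SOURCE A (Python) =====
-- from typing import Any
--
-- def count_by_category(entries: list[dict[str, Any]]) -> dict[str, int]:
--     hanabi = sum(1 for entry in entries if entry.get("category") == "hanabi")
--     matsuri = sum(1 for entry in entries if entry.get("category") == "matsuri")
--     return {
--         "hanabi": hanabi,
--         "matsuri": matsuri,
--         "total": len(entries),
--     }
-- ===== SOURCE B (Python) =====
-- from typing import Any
--
-- def count_by_category(entries: list[dict[str, Any]]) -> dict[str, int]:
--     hanabi = matsuri = total = 0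
--     for entry in entries:
--         category = entry.get("category")
--         if category == "hanabi":
--             hanabi += 1
--         elif category == "matsuri":
--             matsuri += 1
--         total += 1
--     return {"hanabi": hanabi, "matsuri": matsuri, "total": total}
-- ===== Notes on version B (the rewrite author's own statement) =====
-- stated objective: alternative
-- what changed: Replaces A's two staged filtered scans (plus len) with a single fused pass that maintains all three counters in one accumulator, dispatching each entry once through an if/elif chain.
import Mathlib
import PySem

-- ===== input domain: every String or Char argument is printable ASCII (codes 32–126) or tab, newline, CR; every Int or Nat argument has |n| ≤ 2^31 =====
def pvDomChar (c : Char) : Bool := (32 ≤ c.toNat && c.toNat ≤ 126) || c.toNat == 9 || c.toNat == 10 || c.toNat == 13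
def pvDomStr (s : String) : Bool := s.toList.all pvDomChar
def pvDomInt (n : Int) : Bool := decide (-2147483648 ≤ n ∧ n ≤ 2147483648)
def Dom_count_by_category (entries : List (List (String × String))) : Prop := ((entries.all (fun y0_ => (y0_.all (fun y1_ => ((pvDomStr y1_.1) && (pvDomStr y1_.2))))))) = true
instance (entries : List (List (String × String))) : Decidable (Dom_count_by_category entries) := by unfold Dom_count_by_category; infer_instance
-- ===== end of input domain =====

-- B fuses A's two staged filtered scans into one pass maintaining all three counters (alternative decomposition).

-- ===== PORT A =====
-- A: two generator-sums over entries, then a literal dict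
def count_by_category (entries : List (List (String × String))) : List (String × Int) :=
  let hanabi : Int :=
    entries.foldl (fun acc entry =>
      if (PySem.Dict.ofList entry).get? "category" == some "hanabi" then acc + 1 else acc) 0
  let matsuri : Int :=
    entries.foldl (fun acc entry =>
      if (PySem.Dict.ofList entry).get? "category" == some "matsuri" then acc + 1 else acc) 0
  [("hanabi", hanabi), ("matsuri", matsuri), ("total", (entries.length : Int))]

-- ===== PORT B =====
-- B: one fused loop over entries keeping (hanabi, matsuri, total) as the accumulator
def count_by_category_alt (entries : List (List (String × String))) : List (String × Int) :=
  let st : Int × Int × Int :=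
    entries.foldl (fun st entry =>
      let category := (PySem.Dict.ofList entry).get? "category"
      let st :=
        if category == some "hanabi" then (st.1 + 1, st.2.1, st.2.2)
        else if category == some "matsuri" then (st.1, st.2.1 + 1, st.2.2)
        else st
      (st.1, st.2.1, st.2.2 + 1)) (0, 0, 0)
  [("hanabi", st.1), ("matsuri", st.2.1), ("total", st.2.2)]

-- ===== PRECONDITION & SPEC =====
def Spec_count_by_category (entries : List (List (String × String))) (out : List (String × Int)) : Prop := out = count_by_category_alt entries
instance (entries : List (List (String × String))) (out : List (String × Int)) : Decidable (Spec_count_by_category entries out) := by unfold Spec_count_by_category; infer_instance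

-- ===== CLAIM (what is proved, stated in full; the proofs are below) =====
def Claim_equal_count_by_category : Prop := ∀ (entries : List (List (String × String))), Dom_count_by_category entries → Spec_count_by_category entries (count_by_category entries)

-- ===== LEMMAS AND PROOFS =====


-- B's fused fold computed componentwise: each counter equals A's corresponding fold / the length.
theorem fused_fold_eq (entries : List (List (String × String))) (h m t : Int) :
    entries.foldl (fun st entry =>
      let category := (PySem.Dict.ofList entry).get? "category"
      let st :=
        if category == some "hanabi" then (st.1 + 1, st.2.1, st.2.2)
        else if category == some "matsuri" then (st.1, st.2.1 + 1, st.2.2)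
        else st
      (st.1, st.2.1, st.2.2 + 1)) (h, m, t)
    = (entries.foldl (fun acc entry =>
         if (PySem.Dict.ofList entry).get? "category" == some "hanabi" then acc + 1 else acc) h,
       entries.foldl (fun acc entry =>
         if (PySem.Dict.ofList entry).get? "category" == some "matsuri" then acc + 1 else acc) m,
       t + (entries.length : Int)) := by
  induction entries generalizing h m t with
  | nil => simp
  | cons e es ih =>
    simp only [List.foldl_cons]
    rw [ih]
    by_cases h1 : (PySem.Dict.ofList e).get? "category" = some "hanabi"
    · simp [h1, Prod.ext_iff]; omega
    · by_cases h2 : (PySem.Dict.ofList e).get? "category" = some "matsuri"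
      · simp [h2, Prod.ext_iff]; omega
      · simp [h1, h2, Prod.ext_iff]; omega

-- ===== VERDICT (by name: the statement is the Claim_ definition above) =====
theorem count_by_category_spec : Claim_equal_count_by_category := by
  intro entries _
  unfold Spec_count_by_category count_by_category count_by_category_alt
  rw [fused_fold_eq]
  simp
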